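-- pv_equiv track=rewrite | github.com/yasmin2017080127/ONoC-Ring-Topology-Optimization | src/core/routing.py | shortest_path_first
-- ===== SOURCE A (Python) =====
-- def get_clockwise_path(graph, start, end):
--     path = [start]
--     current = start
--     while current != end:
--         current = (current + 1) % len(graph)
--         path.append(current)
--     return path
--
-- def get_counter_clockwise_path(graph, start, end):
--     path = [start]
--     current = start
--     while current != end:
--         current = (current - 1) % len(graph)
--         path.append(current)
--     return path
--
-- def shortest_path_first(graph, sources, targets):
--     """Implements Shortest Path First algorithm for multicast routing."""
--     paths_dict = {}
--     scores_dict = {}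
--
--     for source in sources:
--         # Calculate total path lengths for both directions
--         clock_paths = [get_clockwise_path(graph, source, target) for target in targets]
--         counter_paths = [get_counter_clockwise_path(graph, source, target) for target in targets]
--
--         # Choose direction based on total path length
--         clock_total_length = sum(len(path) for path in clock_paths)
--         counter_total_length = sum(len(path) for path in counter_paths)
--
--         if clock_total_length <= counter_total_length:
--             paths_dict[source] = clock_paths
--             scores_dict[source] = [len(path) for path in clock_paths]
--         else:
--             paths_dict[source] = counter_paths
--             scores_dict[source] = [len(path) for path in counter_paths]
--
--     return paths_dict, scores_dict
-- ===== SOURCE B (Python) =====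
-- def shortest_path_first(graph, sources, targets):
--     """Implements Shortest Path First algorithm for multicast routing."""
--     n = len(graph)
--
--     def length(src, dst, step):
--         # closed-form path length in the given direction (step is +1 or -1)
--         return 1 if src == dst else 2 + (step * (dst - src) - 1) % n
--
--     paths_dict = {}
--     scores_dict = {}
--     for source in sources:
--         cw = [length(source, target, 1) for target in targets]
--         ccw = [length(source, target, -1) for target in targets]
--         if sum(cw) <= sum(ccw):
--             lens, step = cw, 1
--         else:
--             lens, step = ccw, -1
--         paths_dict[source] = [[source] + [(source + step * k) % n for k in range(1, L)]
--                               for L in lens]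
--         scores_dict[source] = lens
--     return paths_dict, scores_dict
-- ===== Notes on version B (the rewrite author's own statement) =====
-- stated objective: alternative
-- what changed: B computes each direction's path length by a closed-form modular formula instead of walking the ring, chooses the direction from those sums, and materializes only the chosen direction's paths via a range comprehension; A step-builds every path in both directions.
import Mathlib
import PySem

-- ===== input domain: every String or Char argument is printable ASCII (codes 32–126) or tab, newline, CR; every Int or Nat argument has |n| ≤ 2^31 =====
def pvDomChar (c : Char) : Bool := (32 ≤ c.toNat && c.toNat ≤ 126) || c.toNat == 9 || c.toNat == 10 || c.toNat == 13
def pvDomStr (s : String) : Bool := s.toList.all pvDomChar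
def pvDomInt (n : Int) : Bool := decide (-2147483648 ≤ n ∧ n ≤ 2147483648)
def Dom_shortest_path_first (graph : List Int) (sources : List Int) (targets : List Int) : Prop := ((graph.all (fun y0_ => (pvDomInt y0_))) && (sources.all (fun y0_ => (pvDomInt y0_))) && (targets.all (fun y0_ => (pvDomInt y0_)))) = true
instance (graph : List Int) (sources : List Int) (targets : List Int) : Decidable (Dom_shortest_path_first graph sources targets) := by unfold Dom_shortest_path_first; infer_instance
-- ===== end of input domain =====

-- ===== PORT A =====
-- B differs from A by computing each direction's path length in closed form and building only the chosen
-- direction's paths; A's while-loops are ported with a fuel of len(graph)+1, which is enough on every input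
-- admitted by Pre_ (A diverges or divides by zero outside Pre_).
def pvCwLoop (n e : Int) : Nat → Int → List Int → List Int
  | 0, _, path => path
  | fuel+1, cur, path =>
      if cur = e then path
      else
        let c := PySem.Int.mod (cur + 1) n
        pvCwLoop n e fuel c (path ++ [c])

def get_clockwise_path (graph : List Int) (start e : Int) : List Int :=
  pvCwLoop (graph.length : Int) e (graph.length + 1) start [start]

def pvCcwLoop (n e : Int) : Nat → Int → List Int → List Int
  | 0, _, path => path
  | fuel+1, cur, path =>
      if cur = e then path
      else
        let c := PySem.Int.mod (cur - 1) n
        pvCcwLoop n e fuel c (path ++ [c])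

def get_counter_clockwise_path (graph : List Int) (start e : Int) : List Int :=
  pvCcwLoop (graph.length : Int) e (graph.length + 1) start [start]

def shortest_path_first (graph : List Int) (sources : List Int) (targets : List Int) :
    (List (Int × List (List Int))) × (List (Int × List Int)) :=
  let st := sources.foldl
    (fun (st : PySem.Dict Int (List (List Int)) × PySem.Dict Int (List Int)) source =>
      let clock_paths := targets.map (fun target => get_clockwise_path graph source target)
      let counter_paths := targets.map (fun target => get_counter_clockwise_path graph source target)
      let clock_total : Int := (clock_paths.map (fun p => (p.length : Int))).sum
      let counter_total : Int := (counter_paths.map (fun p => (p.length : Int))).sum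
      if clock_total ≤ counter_total then
        (st.1.insert source clock_paths,
         st.2.insert source (clock_paths.map (fun p => (p.length : Int))))
      else
        (st.1.insert source counter_paths,
         st.2.insert source (counter_paths.map (fun p => (p.length : Int)))))
    (PySem.Dict.empty, PySem.Dict.empty)
  (st.1.items, st.2.items)

-- ===== PORT B =====
-- closed-form length of the path from src to dst walking in direction step (+1 / -1)
def pvLength (n src dst step : Int) : Int :=
  if src = dst then 1 else 2 + PySem.Int.mod (step * (dst - src) - 1) n

-- [source] + [(source + step*k) % n for k in range(1, L)]
def pvBuildPath (n s step L : Int) : List Int :=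
  s :: (PySem.List.pyRange 1 L 1).map (fun k => PySem.Int.mod (s + step * k) n)

def shortest_path_first_alt (graph : List Int) (sources : List Int) (targets : List Int) :
    (List (Int × List (List Int))) × (List (Int × List Int)) :=
  let n : Int := graph.length
  let st := sources.foldl
    (fun (st : PySem.Dict Int (List (List Int)) × PySem.Dict Int (List Int)) source =>
      let cw := targets.map (fun target => pvLength n source target 1)
      let ccw := targets.map (fun target => pvLength n source target (-1))
      let p := if cw.sum ≤ ccw.sum then (cw, (1 : Int)) else (ccw, (-1 : Int))
      (st.1.insert source (p.1.map (fun L => pvBuildPath n source p.2 L)),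
       st.2.insert source p.1))
    (PySem.Dict.empty, PySem.Dict.empty)
  (st.1.items, st.2.items)

-- ===== PRECONDITION & SPEC =====
-- Pre_ excludes exactly the inputs where A does not return: with some source ≠ target, A raises
-- ZeroDivisionError on an empty graph and loops forever when that target is outside range(len(graph)).
def Pre_shortest_path_first (graph : List Int) (sources : List Int) (targets : List Int) : Prop :=
  ∀ s ∈ sources, ∀ t ∈ targets,
    s = t ∨ (0 < (graph.length : Int) ∧ 0 ≤ t ∧ t < (graph.length : Int))

instance (graph : List Int) (sources : List Int) (targets : List Int) :
    Decidable (Pre_shortest_path_first graph sources targets) := by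
  unfold Pre_shortest_path_first; infer_instance

def pvWitness_shortest_path_first : List Int × List Int × List Int :=
  ([0, 0, 0, 0], [0, 2], [1, 3])

def Spec_shortest_path_first (graph : List Int) (sources : List Int) (targets : List Int)
    (out : (List (Int × List (List Int))) × (List (Int × List Int))) : Prop :=
  out = shortest_path_first_alt graph sources targets

instance (graph : List Int) (sources : List Int) (targets : List Int)
    (out : (List (Int × List (List Int))) × (List (Int × List Int))) :
    Decidable (Spec_shortest_path_first graph sources targets out) := by
  unfold Spec_shortest_path_first; infer_instance

-- ===== CLAIM (what is proved, stated in full; the proofs are below) =====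
def Claim_equal_shortest_path_first : Prop :=
  ∀ (graph : List Int) (sources : List Int) (targets : List Int),
    Dom_shortest_path_first graph sources targets →
    Pre_shortest_path_first graph sources targets →
    Spec_shortest_path_first graph sources targets (shortest_path_first graph sources targets)

-- ===== LEMMAS AND PROOFS =====

lemma pv_emod_add_emod (n a b : Int) : (a % n + b) % n = (a + b) % n := by
  conv_rhs => rw [Int.add_emod]
  rw [Int.add_emod (a % n) b, Int.emod_emod_of_dvd a dvd_rfl]

lemma pv_emod_sub_emod (n a b : Int) : (b - a % n) % n = (b - a) % n := by
  rw [Int.sub_emod, Int.emod_emod_of_dvd a dvd_rfl, ← Int.sub_emod]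

lemma pv_emod_sub_one (n a : Int) (hn : 0 < n) (h1 : 1 ≤ a % n) :
    (a - 1) % n = a % n - 1 := by
  have h2 : a % n < n := Int.emod_lt_of_pos a hn
  have : (a - 1) % n = (a % n - 1) % n := by
    rw [Int.sub_emod a 1, Int.sub_emod (a % n) 1, Int.emod_emod_of_dvd a dvd_rfl]
  rw [this, Int.emod_eq_of_lt (by omega) (by omega)]

lemma pv_emod_sub_emod' (n a b : Int) : (a % n - b) % n = (a - b) % n := by
  rw [Int.sub_emod, Int.emod_emod_of_dvd a dvd_rfl, ← Int.sub_emod]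

lemma pv_emod_pos (n e cur : Int) (hn : 0 < n) (he0 : 0 ≤ e) (hen : e < n)
    (hc0 : 0 ≤ cur) (hcn : cur < n) (hne : cur ≠ e) : 1 ≤ (e - cur) % n := by
  by_cases h : cur ≤ e
  · rw [Int.emod_eq_of_lt (by omega) (by omega)]; omega
  · have h2 : (e - cur + n) % n = (e - cur) % n := Int.add_emod_right (e - cur) n
    rw [← h2, Int.emod_eq_of_lt (by omega) (by omega)]; omega

lemma pvCwLoop_eq (n e : Int) (hn : 0 < n) (he0 : 0 ≤ e) (hen : e < n) :
    ∀ (fuel : Nat) (cur : Int) (path : List Int), 0 ≤ cur → cur < n →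
      ((e - cur) % n).toNat ≤ fuel →
      pvCwLoop n e fuel cur path =
        path ++ (List.range ((e - cur) % n).toNat).map
          (fun (k : Nat) => PySem.Int.mod (cur + 1 + (k : Int)) n) := by
  intro fuel
  induction fuel with
  | zero =>
    intro cur path hc0 hcn hle
    have h0 : ((e - cur) % n).toNat = 0 := Nat.le_zero.mp hle
    simp [pvCwLoop, h0]
  | succ f ih =>
    intro cur path hc0 hcn hle
    by_cases hce : cur = e
    · subst hce
      simp [pvCwLoop]
    · have hd1 : 1 ≤ (e - cur) % n := pv_emod_pos n e cur hn he0 hen hc0 hcn hce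
      have hmod : PySem.Int.mod (cur + 1) n = (cur + 1) % n :=
        PySem.Int.mod_eq_emod_of_pos hn
      have hc'0 : 0 ≤ (cur + 1) % n := Int.emod_nonneg _ (by omega)
      have hc'n : (cur + 1) % n < n := Int.emod_lt_of_pos _ hn
      have hdist : (e - (cur + 1) % n) % n = (e - cur) % n - 1 := by
        rw [pv_emod_sub_emod]
        have : e - (cur + 1) = (e - cur) - 1 := by ring
        rw [this, pv_emod_sub_one n (e - cur) hn hd1]
      have hltn : (e - cur) % n < n := Int.emod_lt_of_pos _ hn
      have hrec := ih ((cur + 1) % n) (path ++ [(cur + 1) % n]) hc'0 hc'n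
        (by rw [hdist]; omega)
      rw [show pvCwLoop n e (f+1) cur path =
        pvCwLoop n e f (PySem.Int.mod (cur + 1) n) (path ++ [PySem.Int.mod (cur + 1) n]) by
          simp [pvCwLoop, hce], hmod, hrec, hdist]
      have hsplit : ((e - cur) % n).toNat = (((e - cur) % n - 1).toNat) + 1 := by omega
      rw [hsplit, List.range_succ_eq_map]
      simp only [List.map_cons, List.map_map]
      rw [List.append_assoc]
      congr 1
      simp only [List.cons_append, List.nil_append]
      congr 1
      · rw [PySem.Int.mod_eq_emod_of_pos hn]
        norm_num
      · apply List.map_congr_left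
        intro k _
        simp only [Function.comp_apply]
        rw [PySem.Int.mod_eq_emod_of_pos hn, PySem.Int.mod_eq_emod_of_pos hn,
            add_assoc, pv_emod_add_emod]
        congr 1
        push_cast
        ring

lemma pvCcwLoop_eq (n e : Int) (hn : 0 < n) (he0 : 0 ≤ e) (hen : e < n) :
    ∀ (fuel : Nat) (cur : Int) (path : List Int), 0 ≤ cur → cur < n →
      ((cur - e) % n).toNat ≤ fuel →
      pvCcwLoop n e fuel cur path =
        path ++ (List.range ((cur - e) % n).toNat).map
          (fun (k : Nat) => PySem.Int.mod (cur - 1 - (k : Int)) n) := by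
  intro fuel
  induction fuel with
  | zero =>
    intro cur path hc0 hcn hle
    have h0 : ((cur - e) % n).toNat = 0 := Nat.le_zero.mp hle
    simp [pvCcwLoop, h0]
  | succ f ih =>
    intro cur path hc0 hcn hle
    by_cases hce : cur = e
    · subst hce
      simp [pvCcwLoop]
    · have hd1 : 1 ≤ (cur - e) % n :=
        pv_emod_pos n cur e hn hc0 hcn he0 hen (fun h => hce h.symm)
      have hmod : PySem.Int.mod (cur - 1) n = (cur - 1) % n :=
        PySem.Int.mod_eq_emod_of_pos hn
      have hc'0 : 0 ≤ (cur - 1) % n := Int.emod_nonneg _ (by omega)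
      have hc'n : (cur - 1) % n < n := Int.emod_lt_of_pos _ hn
      have hdist : ((cur - 1) % n - e) % n = (cur - e) % n - 1 := by
        rw [pv_emod_sub_emod']
        have h4 : cur - 1 - e = (cur - e) - 1 := by ring
        rw [h4, pv_emod_sub_one n (cur - e) hn hd1]
      have hltn : (cur - e) % n < n := Int.emod_lt_of_pos _ hn
      have hrec := ih ((cur - 1) % n) (path ++ [(cur - 1) % n]) hc'0 hc'n
        (by rw [hdist]; omega)
      rw [show pvCcwLoop n e (f+1) cur path =
        pvCcwLoop n e f (PySem.Int.mod (cur - 1) n) (path ++ [PySem.Int.mod (cur - 1) n]) by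
          simp [pvCcwLoop, hce], hmod, hrec, hdist]
      have hsplit : ((cur - e) % n).toNat = (((cur - e) % n - 1).toNat) + 1 := by omega
      rw [hsplit, List.range_succ_eq_map]
      simp only [List.map_cons, List.map_map]
      rw [List.append_assoc]
      congr 1
      simp only [List.cons_append, List.nil_append]
      congr 1
      · rw [PySem.Int.mod_eq_emod_of_pos hn]
        norm_num
      · apply List.map_congr_left
        intro k _
        simp only [Function.comp_apply]
        rw [PySem.Int.mod_eq_emod_of_pos hn, PySem.Int.mod_eq_emod_of_pos hn,
            show (cur - 1) % n - 1 - (k : Int) = (cur - 1) % n - (1 + k) by ring,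
            pv_emod_sub_emod']
        congr 1
        push_cast
        ring

lemma pv_pyRange_map (L : Int) (f : Int → Int) :
    (PySem.List.pyRange 1 L 1).map f =
      (List.range (L - 1).toNat).map (fun (k : Nat) => f (1 + (k : Int))) := by
  apply List.ext_getElem
  · simp [PySem.List.length_pyRange_one]
  · intro i h1 h2
    simp only [List.getElem_map, PySem.List.getElem_pyRange_one, List.getElem_range]

lemma pv_cw_eq (graph : List Int) (s t : Int)
    (h : s = t ∨ (0 < (graph.length : Int) ∧ 0 ≤ t ∧ t < (graph.length : Int))) :
    get_clockwise_path graph s t =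
      pvBuildPath (graph.length : Int) s 1 (pvLength (graph.length : Int) s t 1) := by
  rcases h with hst | ⟨hn, ht0, htn⟩
  · subst hst
    simp [get_clockwise_path, pvCwLoop, pvBuildPath, pvLength,
      PySem.List.pyRange_one_eq_nil (le_refl (1 : Int))]
  · by_cases hst : s = t
    · subst hst
      simp [get_clockwise_path, pvCwLoop, pvBuildPath, pvLength,
        PySem.List.pyRange_one_eq_nil (le_refl (1 : Int))]
    · set n : Int := (graph.length : Int) with hn_def
      have hmod : PySem.Int.mod (s + 1) n = (s + 1) % n := PySem.Int.mod_eq_emod_of_pos hn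
      have hc0 : 0 ≤ (s + 1) % n := Int.emod_nonneg _ (by omega)
      have hcn : (s + 1) % n < n := Int.emod_lt_of_pos _ hn
      have hdn : ((t - (s + 1) % n) % n) < n := Int.emod_lt_of_pos _ hn
      have hd0 : 0 ≤ ((t - (s + 1) % n) % n) := Int.emod_nonneg _ (by omega)
      have hstep : get_clockwise_path graph s t =
          pvCwLoop n t graph.length ((s + 1) % n) [s, (s + 1) % n] := by
        simp [get_clockwise_path, pvCwLoop, hst, ← hn_def, hmod]
      rw [hstep, pvCwLoop_eq n t hn ht0 htn graph.length ((s + 1) % n) _ hc0 hcn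
        (by omega)]
      have hdist : (t - (s + 1) % n) % n = (t - s - 1) % n := by
        rw [pv_emod_sub_emod]; ring_nf
      have hL : pvLength n s t 1 = 2 + (t - s - 1) % n := by
        rw [pvLength, if_neg hst, PySem.Int.mod_eq_emod_of_pos hn]; ring_nf
      rw [pvBuildPath, hL, pv_pyRange_map, hdist]
      have hm1 : 1 ≤ (t - s - 1) % n + 1 := by
        have := Int.emod_nonneg (t - s - 1) (by omega : n ≠ 0); omega
      have htn2 : (2 + (t - s - 1) % n - 1).toNat = ((t - s - 1) % n).toNat + 1 := by
        have := Int.emod_nonneg (t - s - 1) (by omega : n ≠ 0); omega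
      rw [htn2, List.range_succ_eq_map]
      simp only [List.map_cons, List.map_map, List.cons_append, List.nil_append]
      congr 1
      congr 1
      · rw [PySem.Int.mod_eq_emod_of_pos hn]; norm_num
      · apply List.map_congr_left
        intro k _
        simp only [Function.comp_apply]
        rw [PySem.Int.mod_eq_emod_of_pos hn, PySem.Int.mod_eq_emod_of_pos hn,
            add_assoc, pv_emod_add_emod]
        congr 1
        push_cast
        ring

lemma pv_ccw_eq (graph : List Int) (s t : Int)
    (h : s = t ∨ (0 < (graph.length : Int) ∧ 0 ≤ t ∧ t < (graph.length : Int))) :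
    get_counter_clockwise_path graph s t =
      pvBuildPath (graph.length : Int) s (-1) (pvLength (graph.length : Int) s t (-1)) := by
  rcases h with hst | ⟨hn, ht0, htn⟩
  · subst hst
    simp [get_counter_clockwise_path, pvCcwLoop, pvBuildPath, pvLength,
      PySem.List.pyRange_one_eq_nil (le_refl (1 : Int))]
  · by_cases hst : s = t
    · subst hst
      simp [get_counter_clockwise_path, pvCcwLoop, pvBuildPath, pvLength,
        PySem.List.pyRange_one_eq_nil (le_refl (1 : Int))]
    · set n : Int := (graph.length : Int) with hn_def
      have hmod : PySem.Int.mod (s - 1) n = (s - 1) % n := PySem.Int.mod_eq_emod_of_pos hn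
      have hc0 : 0 ≤ (s - 1) % n := Int.emod_nonneg _ (by omega)
      have hcn : (s - 1) % n < n := Int.emod_lt_of_pos _ hn
      have hdn : (((s - 1) % n - t) % n) < n := Int.emod_lt_of_pos _ hn
      have hd0 : 0 ≤ (((s - 1) % n - t) % n) := Int.emod_nonneg _ (by omega)
      have hstep : get_counter_clockwise_path graph s t =
          pvCcwLoop n t graph.length ((s - 1) % n) [s, (s - 1) % n] := by
        simp [get_counter_clockwise_path, pvCcwLoop, hst, ← hn_def, hmod]
      rw [hstep, pvCcwLoop_eq n t hn ht0 htn graph.length ((s - 1) % n) _ hc0 hcn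
        (by omega)]
      have hdist : ((s - 1) % n - t) % n = (s - t - 1) % n := by
        rw [pv_emod_sub_emod']; ring_nf
      have hL : pvLength n s t (-1) = 2 + (s - t - 1) % n := by
        rw [pvLength, if_neg hst, PySem.Int.mod_eq_emod_of_pos hn]; ring_nf
      rw [pvBuildPath, hL, pv_pyRange_map, hdist]
      have htn2 : (2 + (s - t - 1) % n - 1).toNat = ((s - t - 1) % n).toNat + 1 := by
        have := Int.emod_nonneg (s - t - 1) (by omega : n ≠ 0); omega
      rw [htn2, List.range_succ_eq_map]
      simp only [List.map_cons, List.map_map, List.cons_append, List.nil_append]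
      congr 1
      congr 1
      · rw [PySem.Int.mod_eq_emod_of_pos hn]; ring_nf
      · apply List.map_congr_left
        intro k _
        simp only [Function.comp_apply]
        rw [PySem.Int.mod_eq_emod_of_pos hn, PySem.Int.mod_eq_emod_of_pos hn,
            show (s - 1) % n - 1 - (k : Int) = (s - 1) % n - (1 + k) by ring,
            pv_emod_sub_emod']
        congr 1
        push_cast
        ring

lemma pv_len_build (n s step L : Int) (hL : 1 ≤ L) :
    ((pvBuildPath n s step L).length : Int) = L := by
  simp [pvBuildPath, PySem.List.length_pyRange_one]
  omega

lemma pv_length_ge_one (n s t step : Int) (hn : 0 < n) : 1 ≤ pvLength n s t step := by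
  unfold pvLength
  split_ifs with h
  · omega
  · have := PySem.Int.mod_nonneg (step * (t - s) - 1) hn
    omega

lemma pv_length_pos (graph : List Int) (s t step : Int)
    (h : s = t ∨ (0 < (graph.length : Int) ∧ 0 ≤ t ∧ t < (graph.length : Int))) :
    1 ≤ pvLength (graph.length : Int) s t step := by
  rcases h with hst | ⟨hn, -, -⟩
  · simp [pvLength, hst]
  · exact pv_length_ge_one _ s t step hn

-- ===== VERDICT (by name: the statement is the Claim_ definition above) =====
theorem shortest_path_first_spec : Claim_equal_shortest_path_first := by
  intro graph sources targets hdom hpre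
  unfold Spec_shortest_path_first shortest_path_first shortest_path_first_alt
  refine congrArg (fun st : PySem.Dict Int (List (List Int)) × PySem.Dict Int (List Int) =>
    (st.1.items, st.2.items)) ?_
  apply PySem.List.foldl_congr_mem
  intro acc s hs
  have hp := hpre s hs
  dsimp only
  have h1 : targets.map (fun t => get_clockwise_path graph s t) =
      (targets.map (fun t => pvLength (graph.length : Int) s t 1)).map
        (fun L => pvBuildPath (graph.length : Int) s 1 L) := by
    rw [List.map_map]
    exact List.map_congr_left (fun t ht => pv_cw_eq graph s t (hp t ht))
  have h2 : (targets.map (fun t => get_clockwise_path graph s t)).map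
      (fun p => ((p.length : Int))) = targets.map (fun t => pvLength (graph.length : Int) s t 1) := by
    rw [List.map_map]
    apply List.map_congr_left
    intro t ht
    simp only [Function.comp_apply]
    rw [pv_cw_eq graph s t (hp t ht)]
    exact pv_len_build _ _ _ _ (pv_length_pos graph s t 1 (hp t ht))
  have h3 : targets.map (fun t => get_counter_clockwise_path graph s t) =
      (targets.map (fun t => pvLength (graph.length : Int) s t (-1))).map
        (fun L => pvBuildPath (graph.length : Int) s (-1) L) := by
    rw [List.map_map]
    exact List.map_congr_left (fun t ht => pv_ccw_eq graph s t (hp t ht))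
  have h4 : (targets.map (fun t => get_counter_clockwise_path graph s t)).map
      (fun p => ((p.length : Int))) = targets.map (fun t => pvLength (graph.length : Int) s t (-1)) := by
    rw [List.map_map]
    apply List.map_congr_left
    intro t ht
    simp only [Function.comp_apply]
    rw [pv_ccw_eq graph s t (hp t ht)]
    exact pv_len_build _ _ _ _ (pv_length_pos graph s t (-1) (hp t ht))
  rw [h2, h4]
  by_cases hc : (targets.map (fun t => pvLength (graph.length : Int) s t 1)).sum ≤
      (targets.map (fun t => pvLength (graph.length : Int) s t (-1))).sum
  · rw [if_pos hc, if_pos hc, h1]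
  · rw [if_neg hc, if_neg hc, h3]
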